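-- pv_equiv track=rewrite | github.com/Bismuth208/ThermalCam | img_converter/thermal_conv.py | group_consecutives
-- ===== SOURCE A (Python) =====
-- def group_consecutives(vals, step=1):
--     run = []
--     result = [run]
--     expect = None
--
--     for v in vals:
--         if (v[-9 : -4] == expect) or (expect is None):
--             run.append(v)
--         else:
--             run = [v]
--             result.append(run)
--
--         expect = '%.5d' % (int(v[-9 : -4]) + int(step))
--
--     return result
-- ===== SOURCE B (Python) =====
-- def group_consecutives(vals, step=1):
--     groups = []
--     i, n = 0, len(vals)
--     while i < n:
--         j = i + 1
--         while j < n and vals[j][-9:-4] == '%.5d' % (int(vals[j-1][-9:-4]) + int(step)):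
--             j += 1
--         groups.append(vals[i:j])
--         i = j
--     return groups or [[]]
-- ===== Notes on version B (the rewrite author's own statement) =====
-- stated objective: alternative
-- what changed: A threads a mutable current-run/expect accumulator through one fold; B extracts maximal consecutive runs with a two-pointer scan (inner loop advances to the end of each run, outer loop slices it off), with 'groups or [[]]' as the empty base case.
import Mathlib
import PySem

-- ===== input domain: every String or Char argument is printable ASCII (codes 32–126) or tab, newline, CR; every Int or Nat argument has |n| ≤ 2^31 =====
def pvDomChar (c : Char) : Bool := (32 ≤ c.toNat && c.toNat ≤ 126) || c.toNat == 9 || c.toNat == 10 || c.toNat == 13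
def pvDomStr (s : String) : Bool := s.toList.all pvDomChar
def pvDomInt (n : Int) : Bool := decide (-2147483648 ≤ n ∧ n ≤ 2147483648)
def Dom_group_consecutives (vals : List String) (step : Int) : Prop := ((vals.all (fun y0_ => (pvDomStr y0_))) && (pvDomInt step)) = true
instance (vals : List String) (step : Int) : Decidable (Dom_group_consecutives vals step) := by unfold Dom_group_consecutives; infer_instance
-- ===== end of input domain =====

-- B replaces A's single fold with mutable run/expect state by a two-pointer run-extraction scan (objective: alternative decomposition, same cost).

-- shared helpers: both Pythons use v[-9:-4], int(...), and '%.5d' % m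
-- v[-9:-4] on code points (exact Python slice semantics)
def slk (v : String) : List Char := PySem.List.slice v.toList (some (-9)) (some (-4))
-- int(v[-9:-4]); the .getD 0 arm is unreachable under Pre_ (int() would raise ValueError there)
def keyInt (v : String) : Int := (PySem.Int.ofChars? (slk v)).getD 0
-- '%.5d' % m : digits zero-padded to 5, sign in front (so width 6 when negative); exact
def fmt5 (m : Int) : List Char := PySem.Chars.zfill (PySem.Int.toChars m) (if m < 0 then 6 else 5)

-- ===== PORT A =====
def gcLoop (step : Int) : List String → List (List String) → List String → Option (List Char) → List (List String)
  | [], acc, run, _ => acc ++ [run]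
  | v :: rest, acc, run, expect =>
    if slk v = expect.getD [] ∧ expect ≠ none ∨ expect = none then
      gcLoop step rest acc (run ++ [v]) (some (fmt5 (keyInt v + step)))
    else
      gcLoop step rest (acc ++ [run]) [v] (some (fmt5 (keyInt v + step)))

def group_consecutives (vals : List String) (step : Int) : List (List String) :=
  gcLoop step vals [] [] none

-- ===== PORT B =====
-- inner while: extend the run while the next file continues the sequence; returns (tail of run, remainder)
def gcRun (step : Int) (prev : String) : List String → List String × List String
  | [] => ([], [])
  | v :: rest =>
    if slk v = fmt5 (keyInt prev + step) then
      let p := gcRun step v rest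
      (v :: p.1, p.2)
    else ([], v :: rest)

theorem gcRun_snd_le (step : Int) : ∀ (rest : List String) (prev : String),
    (gcRun step prev rest).2.length ≤ rest.length := by
  intro rest
  induction rest with
  | nil => intro prev; simp [gcRun]
  | cons v rest ih =>
    intro prev
    simp only [gcRun]
    split
    · exact Nat.le_succ_of_le (ih v)
    · simp

-- outer while: slice off one run at a time
def gcOuter (step : Int) : List String → List (List String)
  | [] => []
  | v :: rest =>
    (v :: (gcRun step v rest).1) :: gcOuter step (gcRun step v rest).2
  termination_by l => l.length
  decreasing_by exact Nat.lt_succ_of_le (gcRun_snd_le step rest v)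

def group_consecutives_alt (vals : List String) (step : Int) : List (List String) :=
  let gs := gcOuter step vals
  if gs = [] then [[]] else gs

-- ===== PRECONDITION & SPEC =====
-- Pre_ excludes exactly the inputs where A raises ValueError: some int(v[-9:-4]) fails to parse.
def Pre_group_consecutives (vals : List String) (step : Int) : Prop :=
  ∀ v ∈ vals, (PySem.Int.ofChars? (PySem.List.slice v.toList (some (-9)) (some (-4)))).isSome = true
instance (vals : List String) (step : Int) : Decidable (Pre_group_consecutives vals step) := by
  unfold Pre_group_consecutives; infer_instance
def pvWitness_group_consecutives : List String × Int := (["img_00001.jpg", "img_00002.jpg", "img_00009.jpg"], 1)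

def Spec_group_consecutives (vals : List String) (step : Int) (out : List (List String)) : Prop := out = group_consecutives_alt vals step
instance (vals : List String) (step : Int) (out : List (List String)) : Decidable (Spec_group_consecutives vals step out) := by unfold Spec_group_consecutives; infer_instance

-- ===== CLAIM (what is proved, stated in full; the proofs are below) =====
def Claim_equal_group_consecutives : Prop := ∀ (vals : List String) (step : Int), Dom_group_consecutives vals step → Pre_group_consecutives vals step → Spec_group_consecutives vals step (group_consecutives vals step)

-- ===== LEMMAS AND PROOFS =====

-- A's loop, once an expectation is set, produces the current run extended by B's inner
-- while-loop, followed by B's outer loop on the remainder.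
theorem gcLoop_eq (step : Int) : ∀ (rest : List String) (prev : String) (acc : List (List String)) (run : List String),
    gcLoop step rest acc run (some (fmt5 (keyInt prev + step)))
      = acc ++ (run ++ (gcRun step prev rest).1) :: gcOuter step (gcRun step prev rest).2 := by
  intro rest
  induction rest with
  | nil => intro prev acc run; simp [gcLoop, gcRun, gcOuter]
  | cons v rest ih =>
    intro prev acc run
    simp only [gcLoop, gcRun]
    by_cases h : slk v = fmt5 (keyInt prev + step)
    · simp only [Option.getD_some, Option.some_ne_none, ne_eq, not_false_eq_true, and_true,
        or_false]
      rw [if_pos h, if_pos h, ih v]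
      simp
    · simp only [Option.getD_some, Option.some_ne_none, ne_eq, not_false_eq_true, and_true,
        or_false]
      rw [if_neg h, if_neg h, ih v]
      simp [gcOuter]

theorem group_consecutives_spec : Claim_equal_group_consecutives := by
  intro vals step _ _
  unfold Spec_group_consecutives group_consecutives group_consecutives_alt
  cases vals with
  | nil => simp [gcLoop, gcOuter]
  | cons v rest =>
    simp only [gcLoop]
    rw [if_pos (Or.inr trivial), List.nil_append, gcLoop_eq step rest v [] [v]]
    simp [gcOuter]
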